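-- pv_equiv track=rewrite | github.com/baderzone/TopMed | gene_selection.py | get_gene_signeddistance
-- ===== SOURCE A (Python) =====
-- def get_gene_signeddistance(snp_gene_signeddist):
--     gene_distance = dict()
--     # first find the closest distance
--     for snp in snp_gene_signeddist:
--         for gene in snp_gene_signeddist[snp]:
--             d = snp_gene_signeddist[snp][gene]
--             if not gene in gene_distance:
--                 gene_distance[gene] = d
--             elif (abs(d) < abs(gene_distance[gene])):
--                 gene_distance[gene] = d
--     return (gene_distance)
-- ===== SOURCE B (Python) =====
-- def get_gene_signeddistance(snp_gene_signeddist):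
--     # group-then-reduce: collect every signed distance per gene, then take
--     # the min by absolute value (min keeps the first minimum, matching '<')
--     gene_to_dists = dict()
--     for snp, genes in snp_gene_signeddist.items():
--         for gene, d in genes.items():
--             gene_to_dists.setdefault(gene, []).append(d)
--     return {gene: min(dists, key=abs) for gene, dists in gene_to_dists.items()}
-- ===== Notes on version B (the rewrite author's own statement) =====
-- stated objective: alternative
-- what changed: Replaces A's incremental running-minimum dict update with a group-then-reduce shape: first build gene -> list of all signed distances, then reduce each group with min(key=abs), preserving first-encounter order and first-minimum tie-breaking.
import Mathlib
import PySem

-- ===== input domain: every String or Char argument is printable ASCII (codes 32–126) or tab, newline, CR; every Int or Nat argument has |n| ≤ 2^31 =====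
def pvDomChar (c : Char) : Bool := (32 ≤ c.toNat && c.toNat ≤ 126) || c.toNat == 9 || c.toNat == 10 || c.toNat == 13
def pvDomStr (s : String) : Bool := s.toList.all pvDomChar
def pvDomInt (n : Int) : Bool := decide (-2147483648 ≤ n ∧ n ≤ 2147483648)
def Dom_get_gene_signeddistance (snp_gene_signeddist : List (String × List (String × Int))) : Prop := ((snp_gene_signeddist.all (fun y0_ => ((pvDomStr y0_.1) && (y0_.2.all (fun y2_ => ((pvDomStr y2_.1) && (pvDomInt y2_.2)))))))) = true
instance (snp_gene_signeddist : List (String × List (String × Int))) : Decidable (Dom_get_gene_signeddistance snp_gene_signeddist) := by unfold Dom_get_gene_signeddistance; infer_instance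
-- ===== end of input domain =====

-- B replaces A's incremental running-minimum with a group-then-reduce pass (same cost, different shape); proved equal on all inputs.


-- ===== PORT A =====
-- the running-min update for one (gene, distance) pair (A's loop body)
def pvStepA (gd : PySem.Dict String Int) (gv : String × Int) : PySem.Dict String Int :=
  if !(gd.contains gv.1) then gd.insert gv.1 gv.2
  else if |gv.2| < |gd.getD gv.1 0| then gd.insert gv.1 gv.2
  else gd

def get_gene_signeddistance (snp_gene_signeddist : List (String × List (String × Int))) : List (String × Int) :=
  (snp_gene_signeddist.foldl (fun gd snp => snp.2.foldl pvStepA gd) PySem.Dict.empty).items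

-- ===== PORT B =====
-- Source B's inner statement: gene_to_dists.setdefault(gene, []).append(d)
def pvStepB (g2 : PySem.Dict String (List Int)) (gv : String × Int) : PySem.Dict String (List Int) :=
  g2.modify gv.1 [] (· ++ [gv.2])

-- min(dists, key=abs); dists is never empty here, so the .getD 0 default is never used
def pvMinAbs (ds : List Int) : Int := (PySem.List.min? ds (fun x => |x|)).getD 0

def get_gene_signeddistance_alt (snp_gene_signeddist : List (String × List (String × Int))) : List (String × Int) :=
  ((snp_gene_signeddist.foldl (fun g2 snp => snp.2.foldl pvStepB g2) PySem.Dict.empty).items).map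
    (fun p => (p.1, pvMinAbs p.2))

-- ===== PRECONDITION & SPEC =====
def Spec_get_gene_signeddistance (snp_gene_signeddist : List (String × List (String × Int))) (out : List (String × Int)) : Prop := out = get_gene_signeddistance_alt snp_gene_signeddist
instance (snp_gene_signeddist : List (String × List (String × Int))) (out : List (String × Int)) : Decidable (Spec_get_gene_signeddistance snp_gene_signeddist out) := by unfold Spec_get_gene_signeddistance; infer_instance

-- ===== CLAIM (what is proved, stated in full; the proofs are below) =====
def Claim_equal_get_gene_signeddistance : Prop := ∀ (snp_gene_signeddist : List (String × List (String × Int))), Dom_get_gene_signeddistance snp_gene_signeddist → Spec_get_gene_signeddistance snp_gene_signeddist (get_gene_signeddistance snp_gene_signeddist)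

-- ===== LEMMAS AND PROOFS =====

-- the invariant tying A's running-min dict to B's grouping dict
def pvInv (a : PySem.Dict String Int) (b : PySem.Dict String (List Int)) : Prop :=
  b.keys.Nodup ∧ (∀ p ∈ b.items, p.2 ≠ []) ∧
  a.items = b.items.map (fun p => (p.1, pvMinAbs p.2))

theorem pvMinAbs_append (ds : List Int) (hds : ds ≠ []) (v : Int) :
    pvMinAbs (ds ++ [v]) = if |v| < |pvMinAbs ds| then v else pvMinAbs ds := by
  obtain ⟨m, hm⟩ : ∃ m, PySem.List.min? ds (fun x => |x|) = some m := by
    cases hmin : PySem.List.min? ds (fun x => |x|) with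
    | none => exact absurd ((PySem.List.min?_eq_none_iff ds _).mp hmin) hds
    | some m => exact ⟨m, rfl⟩
  have hstep : PySem.List.min? (ds ++ [v]) (fun x => |x|)
      = if |v| < |m| then some v else some m := by
    simp only [PySem.List.min?, List.foldl_append] at hm ⊢
    rw [hm]
    rfl
  simp only [pvMinAbs, hstep, hm, Option.getD_some]
  split_ifs <;> simp

theorem pvInv_step (a : PySem.Dict String Int) (b : PySem.Dict String (List Int))
    (h : pvInv a b) (gv : String × Int) : pvInv (pvStepA a gv) (pvStepB b gv) := by
  obtain ⟨g, v⟩ := gv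
  obtain ⟨hnd, hne, hitems⟩ := h
  have hkeys : a.keys = b.keys := by
    simp only [PySem.Dict.keys, hitems, List.map_map]; rfl
  have hand : a.keys.Nodup := hkeys ▸ hnd
  have hcont : a.contains g = b.contains g := by
    rw [PySem.Dict.contains_eq_decide_mem_keys, PySem.Dict.contains_eq_decide_mem_keys, hkeys]
  by_cases hc : b.contains g = true
  · -- gene already seen: B appends to its list, A updates its running min (or not)
    obtain ⟨ds, hget⟩ : ∃ ds, b.get? g = some ds := by
      have := PySem.Dict.contains_eq_isSome_get? b g
      rw [hc] at this
      exact Option.isSome_iff_exists.mp this.symm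
    have hmem : (g, ds) ∈ b.items := PySem.Dict.mem_items_of_get?_eq_some b hget
    have hdsne : ds ≠ [] := hne _ hmem
    have hbgetD : b.getD g [] = ds := PySem.Dict.getD_of_get?_eq_some b [] hget
    have haD : a.getD g 0 = pvMinAbs ds := by
      have hma : (g, pvMinAbs ds) ∈ a.items := by
        rw [hitems]
        exact List.mem_map_of_mem hmem
      exact PySem.Dict.getD_of_mem_items a hma hand 0
    have huniq : ∀ p ∈ b.items, p.1 = g → p.2 = ds := by
      intro p hp hpg
      have h1 : b.get? p.1 = some p.2 := PySem.Dict.get?_of_mem_items b hp hnd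
      rw [hpg, hget] at h1
      exact (Option.some.inj h1).symm
    have hBitems : (pvStepB b (g, v)).items
        = b.items.map (fun p => if (p.1 == g) = true then (g, ds ++ [v]) else p) := by
      simp only [pvStepB, PySem.Dict.modify, hbgetD]
      exact PySem.Dict.items_insert_of_contains b (ds ++ [v]) hc
    have hBkeys : (pvStepB b (g, v)).keys = b.keys := by
      simp only [pvStepB, PySem.Dict.modify]
      exact PySem.Dict.keys_insert_of_contains b _ hc
    refine ⟨hBkeys ▸ hnd, ?_, ?_⟩
    · intro p hp
      rw [hBitems] at hp
      obtain ⟨q, hq, hqp⟩ := List.mem_map.mp hp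
      by_cases hqg : (q.1 == g) = true <;> simp [hqg] at hqp <;> subst hqp
      · simp
      · exact hne q hq
    · rw [hBitems, List.map_map]
      have hmin : pvMinAbs (ds ++ [v]) = if |v| < |pvMinAbs ds| then v else pvMinAbs ds :=
        pvMinAbs_append ds hdsne v
      by_cases hlt : |v| < |pvMinAbs ds|
      · have hAStep : pvStepA a (g, v) = a.insert g v := by
          simp [pvStepA, hcont, hc, haD, hlt]
        rw [hAStep, PySem.Dict.items_insert_of_contains a v (hcont.trans hc), hitems, List.map_map]
        refine List.map_congr_left ?_
        intro p hp
        by_cases hpg : (p.1 == g) = true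
        · simp [Function.comp, hpg, hmin, hlt]
        · simp [Function.comp, hpg]
      · have hAStep : pvStepA a (g, v) = a := by
          simp [pvStepA, hcont, hc, haD, hlt]
        rw [hAStep, hitems]
        refine List.map_congr_left ?_
        intro p hp
        by_cases hpg : (p.1 == g) = true
        · have hpg' : p.1 = g := by simpa using hpg
          have : p.2 = ds := huniq p hp hpg'
          simp [Function.comp, hmin, hlt, this, hpg']
        · simp [Function.comp, hpg]
  · -- first encounter of the gene: both dicts append a fresh entry
    have hc' : b.contains g = false := by simpa using hc
    have hca : a.contains g = false := hcont.trans hc'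
    have hAStep : pvStepA a (g, v) = a.insert g v := by simp [pvStepA, hca]
    have hBStep : pvStepB b (g, v) = b.insert g [v] := by
      simp [pvStepB, PySem.Dict.modify, PySem.Dict.getD_of_not_contains b [] hc']
    have hgk : g ∉ b.keys := by
      intro hmem
      rw [(PySem.Dict.contains_iff_mem_keys b g).mpr hmem] at hc'
      exact Bool.true_eq_false.mp hc'
    refine ⟨?_, ?_, ?_⟩
    · rw [hBStep, PySem.Dict.keys_insert_of_not_contains b [v] hc']
      simp only [List.nodup_append, List.nodup_singleton, true_and]
      refine ⟨hnd, ?_⟩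
      intro x hx y hy
      have hyg : y = g := by simpa using hy
      subst hyg
      intro hxy
      subst hxy
      exact hgk hx
    · intro p hp
      rw [hBStep, PySem.Dict.items_insert_of_not_contains b [v] hc'] at hp
      rcases List.mem_append.mp hp with h1 | h1
      · exact hne p h1
      · simp at h1; subst h1; simp
    · rw [hAStep, hBStep, PySem.Dict.items_insert_of_not_contains a v hca,
        PySem.Dict.items_insert_of_not_contains b [v] hc', List.map_append, hitems]
      rfl

theorem pvInv_foldl (gvs : List (String × Int)) (a : PySem.Dict String Int)
    (b : PySem.Dict String (List Int)) (h : pvInv a b) :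
    pvInv (gvs.foldl pvStepA a) (gvs.foldl pvStepB b) := by
  induction gvs generalizing a b with
  | nil => exact h
  | cons x t ih => exact ih _ _ (pvInv_step a b h x)

theorem pvInv_outer (l : List (String × List (String × Int))) (a : PySem.Dict String Int)
    (b : PySem.Dict String (List Int)) (h : pvInv a b) :
    pvInv (l.foldl (fun gd snp => snp.2.foldl pvStepA gd) a)
          (l.foldl (fun g2 snp => snp.2.foldl pvStepB g2) b) := by
  induction l generalizing a b with
  | nil => exact h
  | cons x t ih => exact ih _ _ (pvInv_foldl x.2 a b h)

-- ===== VERDICT (by name: the statement is the Claim_ definition above) =====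
theorem get_gene_signeddistance_spec : Claim_equal_get_gene_signeddistance := by
  intro l _
  have h := pvInv_outer l PySem.Dict.empty PySem.Dict.empty
    ⟨by simp [PySem.Dict.empty, PySem.Dict.keys], by simp [PySem.Dict.empty], by simp [PySem.Dict.empty]⟩
  exact h.2.2
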